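-- pv_equiv track=rewrite | github.com/abrar-nazib/contest_codes | icpc_preli/JU/actual_subarray.py | min_deleted_subarray_length
-- ===== SOURCE A (Python) =====
-- def min_deleted_subarray_length(A, B):
--     n = len(A)
--     start, end = 0, n - 1
--
--     # Find the first mismatch from the beginning
--     while start < n and A[start] == B[start]:
--         start += 1
--
--     # Find the first mismatch from the end
--     while end >= 0 and A[end] == B[end]:
--         end -= 1
--
--     # Calculate the minimum length of the deleted subarray
--     min_length = max(0, end - start)
--
--     return min_length
-- ===== SOURCE B (Python) =====
-- def min_deleted_subarray_length(A, B):
--     # one forward pass tracking first and last mismatch positions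
--     first = -1
--     last = -1
--     for i in range(len(A)):
--         if A[i] != B[i]:
--             if first < 0:
--                 first = i
--             last = i
--     return 0 if first < 0 else last - first
-- ===== Notes on version B (the rewrite author's own statement) =====
-- stated objective: simpler
-- what changed: Replaces A's two opposite-direction inward while-loops by a single forward for-loop that records the first and last mismatch index, returning 0 when none exists and last-first otherwise.
import Mathlib
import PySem

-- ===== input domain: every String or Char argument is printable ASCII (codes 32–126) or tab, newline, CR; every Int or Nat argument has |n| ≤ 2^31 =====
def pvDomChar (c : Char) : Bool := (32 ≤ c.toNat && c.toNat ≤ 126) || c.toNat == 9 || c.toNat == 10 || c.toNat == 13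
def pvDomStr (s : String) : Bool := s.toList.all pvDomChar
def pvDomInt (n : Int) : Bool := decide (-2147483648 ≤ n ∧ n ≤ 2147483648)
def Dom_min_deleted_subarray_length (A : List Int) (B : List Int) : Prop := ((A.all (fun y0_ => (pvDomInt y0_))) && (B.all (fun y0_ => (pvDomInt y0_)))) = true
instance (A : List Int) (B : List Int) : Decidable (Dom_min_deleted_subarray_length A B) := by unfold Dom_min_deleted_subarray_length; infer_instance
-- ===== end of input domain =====

-- B replaces A's two opposite-direction inward while-loops by a single forward scan
-- recording the first and last mismatch index (objective: simpler). Return values only; neither mutates.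

-- ===== PORT A =====
-- A's first while loop: advance start while in range and elements agree
-- (indexing via getD; exact on Pre_, where every index either loop reaches is in range for both lists)
def aStartLoop (A B : List Int) (n start : Nat) : Nat :=
  if h : start < n ∧ A.getD start 0 = B.getD start 0 then aStartLoop A B n (start + 1) else start
termination_by n - start
decreasing_by omega

-- A's second while loop: retreat end while nonnegative and elements agree
def aEndLoop (A B : List Int) (e : Int) : Int :=
  if h : 0 ≤ e ∧ A.getD e.toNat 0 = B.getD e.toNat 0 then aEndLoop A B (e - 1) else e
termination_by (e + 1).toNat
decreasing_by omega

def min_deleted_subarray_length (A : List Int) (B : List Int) : Int :=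
  let n := A.length
  let start := aStartLoop A B n 0
  let e := aEndLoop A B ((n : Int) - 1)
  max 0 (e - (start : Int))

-- ===== PORT B =====
-- loop body of Source B's single forward pass: state = (first, last)
def bStep (A B : List Int) (fl : Int × Int) (i : Nat) : Int × Int :=
  if A.getD i 0 ≠ B.getD i 0 then
    ((if fl.1 < 0 then (i : Int) else fl.1), (i : Int))
  else fl

def min_deleted_subarray_length_alt (A : List Int) (B : List Int) : Int :=
  let p := (List.range A.length).foldl (bStep A B) (-1, -1)
  if p.1 < 0 then 0 else p.2 - p.1

-- ===== PRECONDITION & SPEC =====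
-- Pre_ excludes exactly the inputs on which the Python A raises IndexError: when
-- len(B) < len(A) one of A's two scans reaches index len(B) of B (the Python B raises there too).
def Pre_min_deleted_subarray_length (A : List Int) (B : List Int) : Prop := A.length ≤ B.length
instance (A : List Int) (B : List Int) : Decidable (Pre_min_deleted_subarray_length A B) := by
  unfold Pre_min_deleted_subarray_length; infer_instance

def pvWitness_min_deleted_subarray_length : List Int × List Int := ([1, 2, 3, 4], [1, 7, 9, 4])

def Spec_min_deleted_subarray_length (A : List Int) (B : List Int) (out : Int) : Prop := out = min_deleted_subarray_length_alt A B
instance (A : List Int) (B : List Int) (out : Int) : Decidable (Spec_min_deleted_subarray_length A B out) := by unfold Spec_min_deleted_subarray_length; infer_instance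

-- ===== CLAIM (what is proved, stated in full; the proofs are below) =====
def Claim_equal_min_deleted_subarray_length : Prop := ∀ (A : List Int) (B : List Int), Dom_min_deleted_subarray_length A B → Pre_min_deleted_subarray_length A B → Spec_min_deleted_subarray_length A B (min_deleted_subarray_length A B)

-- ===== LEMMAS AND PROOFS =====

-- the mismatch predicate both programs test
def pb (A B : List Int) (i : Nat) : Bool := A.getD i 0 != B.getD i 0

def optInt : Option Nat → Int
  | some i => (i : Int)
  | none => -1

-- A's first loop finds the first mismatch in [s, s+k), or returns n
theorem aStartLoop_eq (A B : List Int) (n : Nat) :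
    ∀ (k s : Nat), n = s + k →
      aStartLoop A B n s =
        match (List.range' s k).find? (pb A B) with
        | some i => i
        | none => n := by
  intro k
  induction k with
  | zero =>
    intro s hs
    rw [aStartLoop]
    rw [dif_neg (by omega)]
    simp [hs]
  | succ k ih =>
    intro s hs
    have hrange : List.range' s (k + 1) = s :: List.range' (s + 1) k := rfl
    rw [hrange]
    by_cases hm : A.getD s 0 = B.getD s 0
    · have hpb : pb A B s = false := by rw [pb, bne_eq_false_iff_eq]; exact hm
      rw [aStartLoop, dif_pos ⟨by omega, hm⟩, List.find?_cons_of_neg (by simp [hpb])]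
      exact ih (s + 1) (by omega)
    · have hpb : pb A B s = true := by rw [pb, bne_iff_ne]; exact hm
      rw [aStartLoop, dif_neg (by tauto), List.find?_cons_of_pos hpb]

-- A's second loop finds the last mismatch in [0, m), or returns -1
theorem aEndLoop_eq (A B : List Int) :
    ∀ (m : Nat), aEndLoop A B ((m : Int) - 1) =
      match ((List.range' 0 m).reverse).find? (pb A B) with
      | some i => (i : Int)
      | none => -1 := by
  intro m
  induction m with
  | zero =>
    rw [aEndLoop, dif_neg (by omega)]
    simp
  | succ m ih =>
    have hrange : (List.range' 0 (m + 1)).reverse = m :: (List.range' 0 m).reverse := by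
      rw [List.range'_1_concat, List.reverse_append]
      simp
    have he : ((m : Int) + 1) - 1 = (m : Int) := by omega
    rw [hrange]
    push_cast
    rw [he]
    by_cases hm : A.getD m 0 = B.getD m 0
    · have hpb : pb A B m = false := by rw [pb, bne_eq_false_iff_eq]; exact hm
      have htn : ((m : Int)).toNat = m := by omega
      rw [aEndLoop, dif_pos ⟨by omega, by rw [htn]; exact hm⟩,
        List.find?_cons_of_neg (by simp [hpb])]
      simpa using ih
    · have hpb : pb A B m = true := by rw [pb, bne_iff_ne]; exact hm
      have htn : ((m : Int)).toNat = m := by omega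
      rw [aEndLoop, dif_neg (by rw [htn]; tauto), List.find?_cons_of_pos hpb]

-- B's fold computes (first, last) of the list of mismatch indices
theorem bFold_eq (A B : List Int) (n : Nat) :
    (List.range n).foldl (bStep A B) (-1, -1) =
      (optInt ((List.range n).filter (pb A B)).head?,
       optInt ((List.range n).filter (pb A B)).getLast?) := by
  induction n with
  | zero => simp [optInt]
  | succ n ih =>
    rw [List.range_succ, List.foldl_append, List.filter_append, ih]
    by_cases hm : A.getD n 0 = B.getD n 0
    · have hpb : pb A B n = false := by rw [pb, bne_eq_false_iff_eq]; exact hm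
      rw [List.foldl_cons, List.foldl_nil, List.filter_cons_of_neg (by simp [hpb]), List.filter_nil,
        List.append_nil, bStep, if_neg (by tauto)]
    · have hpb : pb A B n = true := by rw [pb, bne_iff_ne]; exact hm
      rw [List.foldl_cons, List.foldl_nil, List.filter_cons_of_pos hpb, List.filter_nil,
        bStep, if_pos hm]
      cases hM : (List.range n).filter (pb A B) with
      | nil => simp [optInt]
      | cons a t =>
        have ha : ¬ ((a : Int) < 0) := not_lt.mpr (Int.natCast_nonneg a)
        rw [List.getLast?_concat]
        simp [optInt, ha]

theorem find?_eq_head?_filter' {α : Type} (p : α → Bool) (l : List α) :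
    l.find? p = (l.filter p).head? := by
  induction l with
  | nil => rfl
  | cons a t ih =>
    by_cases h : p a = true
    · rw [List.find?_cons_of_pos h, List.filter_cons_of_pos h, List.head?_cons]
    · rw [List.find?_cons_of_neg h, List.filter_cons_of_neg h, ih]

theorem main_eq (A B : List Int) :
    min_deleted_subarray_length A B = min_deleted_subarray_length_alt A B := by
  unfold min_deleted_subarray_length min_deleted_subarray_length_alt
  dsimp only
  rw [bFold_eq]
  have hS := aStartLoop_eq A B A.length A.length 0 (by omega)
  have hE := aEndLoop_eq A B A.length
  rw [show List.range' 0 A.length = List.range A.length from (List.range_eq_range').symm]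
    at hS hE
  rw [find?_eq_head?_filter'] at hS
  rw [find?_eq_head?_filter', List.filter_reverse, List.head?_reverse] at hE
  rw [hS, hE]
  cases hM : (List.range A.length).filter (pb A B) with
  | nil =>
    simp [optInt]
  | cons a t =>
    have hne : a :: t ≠ [] := by simp
    have hb := List.getLast?_eq_some_getLast hne
    have hpw : ((List.range A.length).filter (pb A B)).Pairwise (· < ·) :=
      List.Pairwise.filter _ (List.pairwise_lt_range)
    rw [hM] at hpw
    have hmem : (a :: t).getLast hne ∈ a :: t := List.getLast_mem hne
    have hab : a ≤ (a :: t).getLast hne := by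
      rcases List.mem_cons.mp hmem with h | h
      · omega
      · exact le_of_lt ((List.pairwise_cons.mp hpw).1 _ h)
    have ha : ¬ ((a : Int) < 0) := not_lt.mpr (Int.natCast_nonneg a)
    simp only [List.head?_cons, hb, optInt, if_neg ha]
    omega

-- ===== VERDICT (by name: the statement is the Claim_ definition above) =====
theorem min_deleted_subarray_length_spec : Claim_equal_min_deleted_subarray_length := by
  intro A B _ _
  exact main_eq A B
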